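-- pv_equiv track=rewrite | github.com/henrywallace/genre-clustering | som.py | find_factorization
-- ===== SOURCE A (Python) =====
-- def find_factorization(x):
--     def loss(x, n, m):
--         return 1*abs(x - n*m) + 2*abs(n - m)
--     def solve(x):
--         (n_min, m_min), loss_min = (None, None), float('inf')
--         for n in range(1, x + 1):
--             for m in range(n, x + 1):
--                 fval = loss(x, n, m)
--                 if fval < loss_min and x <= n*m:
--                     (n_min, m_min), loss_min = (n, m), fval
--         return (n_min, m_min)
--     return solve(x)
-- ===== SOURCE B (Python) =====
-- def find_factorization(x):
--     best, best_loss = (None, None), None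
--     for n in range(1, x + 1):
--         m = max(n, -(-x // n))
--         l = (n * m - x) + 2 * (m - n)
--         if best_loss is None or l < best_loss:
--             best, best_loss = (n, m), l
--     return best
-- ===== Notes on version B (the rewrite author's own statement) =====
-- stated objective: faster
-- what changed: Replaces A's double loop over all pairs (n, m) with a single loop over n that uses the closed-form optimal m = max(n, ceil(x/n)), since for fixed n the loss is strictly increasing over the feasible m.
import Mathlib
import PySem

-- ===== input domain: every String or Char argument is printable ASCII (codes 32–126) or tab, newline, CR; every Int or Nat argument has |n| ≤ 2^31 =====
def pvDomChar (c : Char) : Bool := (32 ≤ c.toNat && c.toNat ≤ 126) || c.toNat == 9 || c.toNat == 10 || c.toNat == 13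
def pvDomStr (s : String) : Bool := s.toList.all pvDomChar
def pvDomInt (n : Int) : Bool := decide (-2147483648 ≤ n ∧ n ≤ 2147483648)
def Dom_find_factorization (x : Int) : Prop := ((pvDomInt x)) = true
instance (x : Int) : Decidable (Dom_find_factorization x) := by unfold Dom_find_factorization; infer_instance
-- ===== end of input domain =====

-- B replaces A's scan over all pairs (n, m) by a single loop over n with the
-- closed-form optimal m = max(n, ceil(x/n)); objective: faster.

-- ===== PORT A =====
-- loss(x, n, m)
def pvLossA (x n m : Int) : Int := 1 * |x - n * m| + 2 * |n - m|

-- 'fval < loss_min' where loss_min : Option Int, none = float('inf')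
def pvLtInf (v : Int) (lm : Option Int) : Bool :=
  match lm with
  | none => true
  | some l => decide (v < l)

-- body of A's inner 'for m' loop; state = ((n_min, m_min), loss_min)
def pvStepA (x n : Int) (s : (Option Int × Option Int) × Option Int) (m : Int) :
    (Option Int × Option Int) × Option Int :=
  let fval := pvLossA x n m
  if pvLtInf fval s.2 && decide (x ≤ n * m) then ((some n, some m), some fval) else s

def find_factorization (x : Int) : Option Int × Option Int :=
  ((PySem.List.pyRange 1 (x + 1) 1).foldl
    (fun s n => (PySem.List.pyRange n (x + 1) 1).foldl (pvStepA x n) s)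
    ((none, none), none)).1

-- ===== PORT B =====
-- body of B's single 'for n' loop; state = (best, best_loss) with best_loss = none for Python None
def pvStepB (x : Int) (s : (Option Int × Option Int) × Option Int) (n : Int) :
    (Option Int × Option Int) × Option Int :=
  let m := max n (-(PySem.Int.floordiv (-x) n))
  let l := (n * m - x) + 2 * (m - n)
  match s.2 with
  | none => ((some n, some m), some l)
  | some bl => if l < bl then ((some n, some m), some l) else s

def find_factorization_alt (x : Int) : Option Int × Option Int :=
  ((PySem.List.pyRange 1 (x + 1) 1).foldl (pvStepB x) ((none, none), none)).1

-- ===== PRECONDITION & SPEC =====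
def Spec_find_factorization (x : Int) (out : Option Int × Option Int) : Prop := out = find_factorization_alt x
instance (x : Int) (out : Option Int × Option Int) : Decidable (Spec_find_factorization x out) := by unfold Spec_find_factorization; infer_instance

-- ===== CLAIM (what is proved, stated in full; the proofs are below) =====
def Claim_equal_find_factorization : Prop := ∀ (x : Int), Dom_find_factorization x → Spec_find_factorization x (find_factorization x)

-- ===== LEMMAS AND PROOFS =====

-- ceiling division facts for c := -((-x) // n), n ≥ 1
theorem pv_ceil_facts (x n : Int) (hn : 1 ≤ n) :
    (-(PySem.Int.floordiv (-x) n) - 1) * n < x ∧ x ≤ -(PySem.Int.floordiv (-x) n) * n :=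
  (PySem.Int.neg_floordiv_neg_eq_iff_of_pos (a := x) (b := n)
    (q := -(PySem.Int.floordiv (-x) n)) (by omega)).mp rfl

-- once the running loss_min is ≤ the loss at M (with n ≤ M, x ≤ n*M), all m > M leave the state unchanged
theorem pv_no_upd (x n M L : Int) (hn : 1 ≤ n) (hnM : n ≤ M) (hxM : x ≤ n * M)
    (hL : L ≤ n * M - x + 2 * (M - n)) :
    ∀ (k : Nat) (a : Int), (x + 1 - a).toNat = k → M < a →
      ∀ (p : Option Int × Option Int),
        (PySem.List.pyRange a (x + 1) 1).foldl (pvStepA x n) (p, some L) = (p, some L) := by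
  intro k
  induction k with
  | zero =>
    intro a hk _ p
    rw [PySem.List.pyRange_one_eq_nil (by omega)]
    rfl
  | succ k ih =>
    intro a hk ha p
    rw [PySem.List.pyRange_one_cons (by omega)]
    have hMa : n * M + n ≤ n * a := by nlinarith
    have habs1 : |x - n * a| = n * a - x := by rw [abs_of_nonpos (by omega)]; ring
    have habs2 : |n - a| = a - n := by rw [abs_of_nonpos (by omega)]; ring
    have hfval : pvLossA x n a = n * a - x + 2 * (a - n) := by
      simp [pvLossA, habs1, habs2]
    have hnotlt : ¬ (pvLossA x n a < L) := by rw [hfval]; omega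
    have hstep : pvStepA x n (p, some L) a = (p, some L) := by
      simp [pvStepA, pvLtInf, hnotlt]
    rw [List.foldl_cons, hstep]
    exact ih (a + 1) (by omega) (by omega) p

-- A's inner loop from any a with n ≤ a ≤ M collapses to B's single candidate update
theorem pv_inner (x n : Int) (hn : 1 ≤ n) (hnx : n ≤ x) :
    ∀ (k : Nat) (a : Int), (max n (-(PySem.Int.floordiv (-x) n)) - a).toNat = k →
      n ≤ a → a ≤ max n (-(PySem.Int.floordiv (-x) n)) →
      ∀ s, (PySem.List.pyRange a (x + 1) 1).foldl (pvStepA x n) s = pvStepB x s n := by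
  obtain ⟨hc1, hc2⟩ := pv_ceil_facts x n hn
  set c := -(PySem.Int.floordiv (-x) n) with hc
  have hcpos : 1 ≤ c := by nlinarith
  have hcx : c ≤ x := by nlinarith
  set M := max n c with hM
  have hMx : M ≤ x := by simp [hM]; omega
  have hxM : x ≤ n * M := by
    have h1 : n * c ≥ x := by nlinarith
    have h2 : c ≤ M := le_max_right _ _
    nlinarith
  intro k
  induction k with
  | zero =>
    -- a = M : the candidate step, then the tail never updates
    intro a hk ha haM s
    have haM' : a = M := by omega
    subst haM'
    obtain ⟨p, lm⟩ := s
    rw [PySem.List.pyRange_one_cons (by omega)]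
    have habs1 : |x - n * M| = n * M - x := by rw [abs_of_nonpos (by omega)]; ring
    have habs2 : |n - M| = M - n := by rw [abs_of_nonpos (by omega)]; ring
    have hfval : pvLossA x n M = n * M - x + 2 * (M - n) := by
      simp [pvLossA, habs1, habs2]
    rw [List.foldl_cons]
    cases lm with
    | none =>
      have hstep : pvStepA x n (p, none) M = ((some n, some M), some (pvLossA x n M)) := by
        simp [pvStepA, pvLtInf, hxM]
      rw [hstep, pv_no_upd x n M (pvLossA x n M) hn (le_max_left _ _) hxM (le_of_eq hfval)
        (x + 1 - (M + 1)).toNat (M + 1) rfl (by omega)]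
      simp only [pvStepB]
      rw [← hc, ← hM, hfval]
    | some bl =>
      by_cases hlt : pvLossA x n M < bl
      · have hstep : pvStepA x n (p, some bl) M = ((some n, some M), some (pvLossA x n M)) := by
          simp [pvStepA, pvLtInf, hlt, hxM]
        rw [hstep, pv_no_upd x n M (pvLossA x n M) hn (le_max_left _ _) hxM (le_of_eq hfval)
          (x + 1 - (M + 1)).toNat (M + 1) rfl (by omega)]
        simp only [pvStepB]
        rw [← hc, ← hM, hfval, if_pos (hfval ▸ hlt)]
      · have hstep : pvStepA x n (p, some bl) M = (p, some bl) := by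
          simp [pvStepA, pvLtInf, hlt]
        rw [hstep, pv_no_upd x n M bl hn (le_max_left _ _) hxM (by rw [hfval] at hlt; omega)
          (x + 1 - (M + 1)).toNat (M + 1) rfl (by omega)]
        simp only [pvStepB]
        rw [← hc, ← hM, if_neg (hfval ▸ hlt)]
  | succ k ih =>
    -- a < M : here M = c and n*a < x, so the guard x ≤ n*a fails and the element is skipped
    intro a hk ha haM s
    have haM' : a < M := by omega
    have hac : a < c := by
      rcases max_cases n c with ⟨h1, _⟩ | ⟨h1, _⟩ <;> omega
    have hna : n * a < x := by nlinarith
    rw [PySem.List.pyRange_one_cons (by omega)]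
    have hstep : pvStepA x n s a = s := by
      simp [pvStepA, pvLtInf, hna]
    rw [List.foldl_cons, hstep]
    exact ih (a + 1) (by omega) (by omega) (by omega) s

-- ===== VERDICT (by name: the statement is the Claim_ definition above) =====
theorem find_factorization_spec : Claim_equal_find_factorization := by
  intro x _
  unfold Spec_find_factorization find_factorization find_factorization_alt
  congr 1
  apply PySem.List.foldl_congr_mem
  intro s n hn
  rw [PySem.List.mem_pyRange_one] at hn
  exact pv_inner x n (by omega) (by omega)
    (max n (-(PySem.Int.floordiv (-x) n)) - n).toNat n rfl le_rfl (le_max_left _ _) s
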